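-- pv_equiv track=rewrite | github.com/m0ksem/python-topic-1 | tests/python/tests/simple.py | find_sums
-- ===== SOURCE A (Python) =====
-- def make_tetradic_number(index: int) -> int:
--   return (index * (index + 1) * (index + 2)) // 6
--
-- def make_tetradic_numbers(num: int) -> list:
--   numbers = []
--   index = 0
--
--   while True:
--     tetradic_number = make_tetradic_number(index)
--     if tetradic_number > num:
--       break
--
--     numbers.append(tetradic_number)
--     index += 1
--
--   return numbers
--
-- def find_sums(input_number: int) -> list:
--   tetradic_numbers = make_tetradic_numbers(input_number)
--   length = len(tetradic_numbers)
--
--   for i1 in range(length):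
--     n1 = make_tetradic_number(i1)
--     required1 = input_number - n1
--     for i2 in range(length):
--       n2 = make_tetradic_number(i2)
--       required2 = required1 - n2
--       for i3 in range(length):
--         n3 = make_tetradic_number(i3)
--         required3 = required2 - n3
--         for i4 in range(length):
--           n4 = make_tetradic_number(i4)
--           required4 = required3 - n4
--           for i5 in range(length):
--             n5 = make_tetradic_number(i5)
--             required5 = required4 - n5
--             if required5 == 0:
--               return [n1, n2, n3, n4, n5]
--
--   return None
-- ===== SOURCE B (Python) =====
-- def find_sums(input_number: int) -> list:
--     # Faster: 4 nested loops over the tetrahedral values plus an O(1) set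
--     # membership test for the fifth summand, instead of A's 5 nested loops.
--     tets = []
--     k = 0
--     while k * (k + 1) * (k + 2) // 6 <= input_number:
--         tets.append(k * (k + 1) * (k + 2) // 6)
--         k += 1
--     tet_set = set(tets)
--     for n1 in tets:
--         for n2 in tets:
--             for n3 in tets:
--                 for n4 in tets:
--                     n5 = input_number - n1 - n2 - n3 - n4
--                     if n5 in tet_set:
--                         return [n1, n2, n3, n4, n5]
--     return None
-- ===== Notes on version B (the rewrite author's own statement) =====
-- stated objective: faster
-- what changed: B precomputes the tetrahedral values once as a set and replaces A's fifth nested index loop (which recomputes each tetrahedral number) with a single set-membership test on the remainder.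
import Mathlib
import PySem

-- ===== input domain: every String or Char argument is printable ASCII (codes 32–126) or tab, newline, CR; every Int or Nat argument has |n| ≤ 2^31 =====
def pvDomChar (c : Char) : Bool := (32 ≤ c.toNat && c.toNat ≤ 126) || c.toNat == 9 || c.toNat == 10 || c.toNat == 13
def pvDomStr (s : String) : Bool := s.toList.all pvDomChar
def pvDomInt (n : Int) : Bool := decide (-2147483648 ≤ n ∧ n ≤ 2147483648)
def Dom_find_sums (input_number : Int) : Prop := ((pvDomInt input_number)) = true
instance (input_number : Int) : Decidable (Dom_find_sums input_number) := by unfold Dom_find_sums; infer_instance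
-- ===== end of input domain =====

-- B replaces A's innermost scan for the fifth tetrahedral summand with a set-membership
-- lookup over the precomputed tetrahedral values (objective: faster, one nesting level less).


-- ===== PORT A =====
def make_tetradic_number (index : Int) : Int :=
  PySem.Int.floordiv (index * (index + 1) * (index + 2)) 6

-- k*(k+1)*(k+2)//6 ≥ k : used by both while-loop ports for termination
theorem tet_ge (k : Nat) : (k : Int) ≤ make_tetradic_number (k : Int) := by
  cases k with
  | zero => exact le_of_eq (by decide)
  | succ n =>
    refine (PySem.Int.le_floordiv_iff_mul_le (by decide)).mpr ?_
    rw [mul_assoc]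
    refine mul_le_mul_of_nonneg_left ?_ (Int.natCast_nonneg (n + 1))
    calc (6 : Int) = 2 * 3 := by decide
      _ ≤ ((n + 1 : Nat) + 1) * ((n + 1 : Nat) + 2) :=
          mul_le_mul
            (by exact_mod_cast show 2 ≤ n + 1 + 1 from Nat.succ_le_succ (Nat.succ_le_succ (Nat.zero_le n)))
            (by exact_mod_cast show 3 ≤ n + 1 + 2 from
              Nat.succ_le_succ (Nat.succ_le_succ (Nat.succ_le_succ (Nat.zero_le n))))
            (by decide)
            (by exact_mod_cast Nat.zero_le (n + 1 + 1))

-- bound used by the termination measures of both while-loop ports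
theorem idx_le_toNat {num : Int} {index : Nat} (h : make_tetradic_number (index : Int) ≤ num) :
    index < num.toNat + 1 :=
  Nat.lt_succ_of_le (by
    have h3 := Int.toNat_le_toNat (le_trans (tet_ge index) h)
    rwa [Int.toNat_natCast] at h3)

-- the 'while True: … if > num: break …' loop of make_tetradic_numbers, index starts at 0
def make_tetradic_numbers_loop (num : Int) (index : Nat) : List Int :=
  if make_tetradic_number (index : Int) > num then []
  else make_tetradic_number (index : Int) :: make_tetradic_numbers_loop num (index + 1)
termination_by num.toNat + 1 - index
decreasing_by
  rename_i h
  exact Nat.sub_succ_lt_self _ _ (idx_le_toNat (not_lt.mp h))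

def make_tetradic_numbers (num : Int) : List Int := make_tetradic_numbers_loop num 0

def find_sums (input_number : Int) : Option (List Int) :=
  let tetradic_numbers := make_tetradic_numbers input_number
  let length := tetradic_numbers.length
  (List.range length).findSome? fun (i1 : Nat) =>
    let n1 := make_tetradic_number (i1 : Int)
    let required1 := input_number - n1
    (List.range length).findSome? fun (i2 : Nat) =>
      let n2 := make_tetradic_number (i2 : Int)
      let required2 := required1 - n2
      (List.range length).findSome? fun (i3 : Nat) =>
        let n3 := make_tetradic_number (i3 : Int)
        let required3 := required2 - n3
        (List.range length).findSome? fun (i4 : Nat) =>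
          let n4 := make_tetradic_number (i4 : Int)
          let required4 := required3 - n4
          (List.range length).findSome? fun (i5 : Nat) =>
            let n5 := make_tetradic_number (i5 : Int)
            let required5 := required4 - n5
            if required5 == 0 then some [n1, n2, n3, n4, n5] else none

-- ===== PORT B =====
-- Source B's generation loop: 'while k*(k+1)*(k+2)//6 <= input_number: tets.append(…); k += 1'
def tets_build (input_number : Int) (k : Nat) : List Int :=
  if PySem.Int.floordiv ((k : Int) * ((k : Int) + 1) * ((k : Int) + 2)) 6 ≤ input_number then
    PySem.Int.floordiv ((k : Int) * ((k : Int) + 1) * ((k : Int) + 2)) 6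
      :: tets_build input_number (k + 1)
  else []
termination_by input_number.toNat + 1 - k
decreasing_by
  rename_i h
  exact Nat.sub_succ_lt_self _ _ (idx_le_toNat h)

def find_sums_alt (input_number : Int) : Option (List Int) :=
  let tets := tets_build input_number 0
  let tet_set := PySem.Set.ofList tets
  tets.findSome? fun n1 =>
    tets.findSome? fun n2 =>
      tets.findSome? fun n3 =>
        tets.findSome? fun n4 =>
          let n5 := input_number - n1 - n2 - n3 - n4
          if tet_set.contains n5 then some [n1, n2, n3, n4, n5] else none

-- ===== PRECONDITION & SPEC =====
def Spec_find_sums (input_number : Int) (out : Option (List Int)) : Prop := out = find_sums_alt input_number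
instance (input_number : Int) (out : Option (List Int)) : Decidable (Spec_find_sums input_number out) := by unfold Spec_find_sums; infer_instance

-- ===== CLAIM (what is proved, stated in full; the proofs are below) =====
def Claim_equal_find_sums : Prop := ∀ (input_number : Int), Dom_find_sums input_number → Spec_find_sums input_number (find_sums input_number)

-- ===== LEMMAS AND PROOFS =====

-- B's generation loop builds the same list as A's helper
theorem tets_build_eq (num : Int) (k : Nat) :
    tets_build num k = make_tetradic_numbers_loop num k := by
  rw [tets_build, make_tetradic_numbers_loop]
  simp only [make_tetradic_number]
  by_cases h : PySem.Int.floordiv ((k : Int) * ((k : Int) + 1) * ((k : Int) + 2)) 6 ≤ num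
  · rw [if_pos h, if_neg (not_lt.mpr h), tets_build_eq]
  · rw [if_neg h, if_pos (lt_of_not_ge h)]
termination_by num.toNat + 1 - k
decreasing_by
  exact Nat.sub_succ_lt_self _ _ (idx_le_toNat h)

-- the generated list is the tetrahedral numbers indexed from k
theorem loop_eq_map (num : Int) (k : Nat) :
    make_tetradic_numbers_loop num k =
      (List.range (make_tetradic_numbers_loop num k).length).map
        (fun j => make_tetradic_number ((k + j : Nat) : Int)) := by
  rw [make_tetradic_numbers_loop]
  split
  · simp
  · have ih := loop_eq_map num (k + 1)
    simp only [List.length_cons]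
    rw [List.range_succ_eq_map]
    simp only [List.map_cons, List.map_map]
    refine List.cons_eq_cons.mpr ⟨by norm_num, ?_⟩
    conv_lhs => rw [ih]
    apply List.map_congr_left
    intro j _
    simp only [Function.comp]
    congr 1
    omega
termination_by num.toNat + 1 - k
decreasing_by
  rename_i h
  exact Nat.sub_succ_lt_self _ _ (idx_le_toNat (not_lt.mp h))

-- a congruence rule for findSome?
theorem findSome?_congr {α β : Type} (l : List α) (f g : α → Option β)
    (h : ∀ x ∈ l, f x = g x) : l.findSome? f = l.findSome? g := by
  induction l with
  | nil => rfl
  | cons x xs ih =>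
    simp only [List.findSome?_cons, h x (by simp)]
    cases g x with
    | none => exact ih (fun y hy => h y (by simp [hy]))
    | some b => rfl

-- A's innermost index scan ≡ B's membership test
theorem inner_scan_eq (l : List Int) (r : Int) (g : Int → List Int) :
    l.findSome? (fun x => if r - x == 0 then some (g x) else none) =
      if (PySem.Set.ofList l).contains r then some (g r) else none := by
  have hmem : (PySem.Set.ofList l).contains r = l.contains r := by
    simp [PySem.Set.mem_ofList]
  rw [hmem]
  clear hmem
  induction l with
  | nil => rfl
  | cons x xs ih =>
    simp only [List.findSome?_cons, List.contains_cons]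
    by_cases hx : x = r
    · subst hx; simp
    · have h1 : (r - x == 0) = false := by simp only [beq_eq_false_iff_ne]; omega
      have h2 : (r == x) = false := by simp only [beq_eq_false_iff_ne]; omega
      simp only [h1, h2, Bool.false_eq_true, if_false, Bool.false_or]
      exact ih

-- ===== VERDICT (by name: the statement is the Claim_ definition above) =====
theorem find_sums_spec : Claim_equal_find_sums := by
  intro input_number _
  unfold Spec_find_sums
  simp only [find_sums, find_sums_alt, make_tetradic_numbers, tets_build_eq]
  rw [loop_eq_map input_number 0]
  simp only [List.length_map, List.length_range, Nat.zero_add]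
  generalize (make_tetradic_numbers_loop input_number 0).length = L
  rw [List.findSome?_map]
  apply findSome?_congr
  intro i1 _
  simp only [Function.comp]
  rw [List.findSome?_map]
  apply findSome?_congr
  intro i2 _
  simp only [Function.comp]
  rw [List.findSome?_map]
  apply findSome?_congr
  intro i3 _
  simp only [Function.comp]
  rw [List.findSome?_map]
  apply findSome?_congr
  intro i4 _
  simp only [Function.comp]
  have hinner := inner_scan_eq ((List.range L).map (fun (j : Nat) => make_tetradic_number (j : Int)))
    (input_number - make_tetradic_number (i1 : Int) - make_tetradic_number (i2 : Int) -
      make_tetradic_number (i3 : Int) - make_tetradic_number (i4 : Int))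
    (fun x => [make_tetradic_number (i1 : Int), make_tetradic_number (i2 : Int),
               make_tetradic_number (i3 : Int), make_tetradic_number (i4 : Int), x])
  rw [List.findSome?_map] at hinner
  exact hinner
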